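-- pv_equiv track=rewrite | github.com/Timoniche/tiger-cf | notebooks/build_positive_pairs.py | positive_pairs
-- ===== SOURCE A (Python) =====
-- from typing import Dict, Iterable, Iterator, List, Sequence, Tuple
--
-- History = Sequence[int]
--
-- Pair = Tuple[int, int]
--
-- def positive_pairs(history: History, window_size: int = 2) -> Iterator[Pair]:
--     """Yield sliding window pairs from *history*.
--
--     Parameters
--     ----------
--     history:
--         An ordered sequence of item identifiers.
--     window_size:
--         Size of the sliding window. For example, ``window_size=2`` yields
--         adjacent pairs.
--     """
--
--     if window_size < 2:
--         raise ValueError("Window size must be at least 2 to form a pair")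
--
--     if len(history) < window_size:
--         return
--
--     for start in range(len(history) - window_size + 1):
--         window = history[start : start + window_size]
--         yield window[0], window[-1]
-- ===== SOURCE B (Python) =====
-- def positive_pairs(history, window_size=2):
--     """Single streaming pass: maintain a FIFO buffer of the previous
--     window_size-1 items; when it is full, pop its front and pair it with the
--     current item. No indexing or slicing of history at all."""
--     if window_size < 2:
--         raise ValueError("Window size must be at least 2 to form a pair")
--     buf = []
--     for item in history:
--         if len(buf) == window_size - 1:
--             yield buf.pop(0), item
--         buf.append(item)
-- ===== Notes on version B (the rewrite author's own statement) =====
-- stated objective: alternative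
-- what changed: Replaced the window-start index loop that slices out each window with a single streaming pass maintaining an explicit FIFO buffer of the previous window_size-1 items: each incoming item is paired with the buffer's popped front, so history is consumed purely sequentially with no indexing or slicing.
import Mathlib
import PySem

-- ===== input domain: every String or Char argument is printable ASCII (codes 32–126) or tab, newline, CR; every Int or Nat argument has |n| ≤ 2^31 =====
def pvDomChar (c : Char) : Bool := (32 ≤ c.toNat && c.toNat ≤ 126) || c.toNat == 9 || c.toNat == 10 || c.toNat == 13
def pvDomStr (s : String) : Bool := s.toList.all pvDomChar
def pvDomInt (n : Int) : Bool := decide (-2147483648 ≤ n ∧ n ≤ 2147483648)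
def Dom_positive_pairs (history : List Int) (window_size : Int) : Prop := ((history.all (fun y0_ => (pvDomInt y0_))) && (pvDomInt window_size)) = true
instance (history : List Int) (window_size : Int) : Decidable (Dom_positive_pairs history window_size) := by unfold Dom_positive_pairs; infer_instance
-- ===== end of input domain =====

-- B replaces A's window-start index loop with slicing by a single streaming pass over history that
-- maintains a FIFO buffer of the previous window_size-1 items (alternative decomposition, same cost).
-- Python A/B are generators; equivalence is about the list of yielded pairs.

-- ===== PORT A =====
-- literal port of A's loop: for start in range(len-ws+1): window = history[start:start+ws]; yield window[0], window[-1]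
def positive_pairs (history : List Int) (window_size : Int) : List (Int × Int) :=
  if window_size < 2 then []   -- Python raises ValueError here; excluded by Pre_
  else if (history.length : Int) < window_size then []
  else
    (PySem.List.pyRange 0 ((history.length : Int) - window_size + 1) 1).foldl
      (fun acc start =>
        let window := PySem.List.slice history (some start) (some (start + window_size))
        acc ++ [(PySem.List.pyGetD window 0 0, PySem.List.pyGetD window (-1) 0)]) []

-- ===== PORT B =====
-- literal port of B's streaming loop: state = (buf, yielded pairs);
-- if len(buf) == window_size-1: yield (buf.pop(0), item); buf.append(item)
def pvStepB (window_size : Int) (st : List Int × List (Int × Int)) (item : Int) :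
    List Int × List (Int × Int) :=
  if (st.1.length : Int) == window_size - 1 then
    (st.1.tail ++ [item], st.2 ++ [(st.1.headD 0, item)])   -- pop(0) = front (buf nonempty here since window_size ≥ 2)
  else (st.1 ++ [item], st.2)

def positive_pairs_alt (history : List Int) (window_size : Int) : List (Int × Int) :=
  if window_size < 2 then []   -- Python raises ValueError here; excluded by Pre_
  else (history.foldl (pvStepB window_size) ([], [])).2

-- ===== PRECONDITION & SPEC =====
-- A (and B) raise ValueError when window_size < 2; exactly those inputs are excluded.
def Pre_positive_pairs (history : List Int) (window_size : Int) : Prop := 2 ≤ window_size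
instance (history : List Int) (window_size : Int) : Decidable (Pre_positive_pairs history window_size) := by unfold Pre_positive_pairs; infer_instance
def pvWitness_positive_pairs : List Int × Int := ([3, 1, 4, 1, 5], 2)

def Spec_positive_pairs (history : List Int) (window_size : Int) (out : List (Int × Int)) : Prop := out = positive_pairs_alt history window_size
instance (history : List Int) (window_size : Int) (out : List (Int × Int)) : Decidable (Spec_positive_pairs history window_size out) := by unfold Spec_positive_pairs; infer_instance

-- ===== CLAIM (what is proved, stated in full; the proofs are below) =====
def Claim_equal_positive_pairs : Prop := ∀ (history : List Int) (window_size : Int), Dom_positive_pairs history window_size → Pre_positive_pairs history window_size → Spec_positive_pairs history window_size (positive_pairs history window_size)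

-- ===== LEMMAS AND PROOFS =====

-- A's fold equals the closed form: each element zipped with the one w-1 positions later.
lemma pv_window_eq_zip (history : List Int) (w : Nat) (hw : 2 ≤ w)
    (hn : w ≤ history.length) :
    (PySem.List.pyRange 0 ((history.length : Int) - (w:Int) + 1) 1).foldl
      (fun acc start =>
        let window := PySem.List.slice history (some start) (some (start + (w:Int)))
        acc ++ [(PySem.List.pyGetD window 0 0, PySem.List.pyGetD window (-1) 0)]) []
    = history.zip (history.drop (w - 1)) := by
  rw [PySem.List.foldl_append_singleton_eq_map, List.nil_append]
  have hc : ((history.length : Int) - (w:Int) + 1) = ((history.length - w + 1 : Nat) : Int) := by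
    omega
  apply List.ext_getElem
  · simp [PySem.List.length_pyRange_one, List.length_zip, hc]
    omega
  · intro i h1 h2
    have hi : i < history.length - w + 1 := by
      simpa [PySem.List.length_pyRange_one, hc] using h1
    rw [List.getElem_map, PySem.List.getElem_pyRange_one]
    have harg : (0 : Int) + (i : Int) = ((i : Nat) : Int) := by omega
    rw [harg]
    have hslice : PySem.List.slice history (some (i:Int)) ((some ((i:Int) + (w:Int)))) =
        (history.drop i).take w := by
      simpa using PySem.List.slice_natCast_add history i w
    simp only [hslice]
    have hlen : ((history.drop i).take w).length = w := by
      simp; omega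
    rw [PySem.List.pyGetD_zero, PySem.List.pyGetD_neg_ofNat _ 1 _ (by omega) (by omega)]
    rw [List.getD_eq_getElem _ _ (by omega)]
    rw [List.getElem_zip]
    congr 1
    · simp [List.getElem_take, List.getElem_drop]
    · simp only [hlen, List.getElem_take, List.getElem_drop]
      congr 1
      omega

-- B's streaming fold equals the same closed form, for any buffer of at most w-1 pending items.
lemma pvB_fold (w : Nat) (hw : 2 ≤ w) :
    ∀ (l buf : List Int) (out : List (Int × Int)), buf.length ≤ w - 1 →
      (l.foldl (pvStepB (w : Int)) (buf, out)).2
        = out ++ (buf ++ l).zip ((buf ++ l).drop (w - 1)) := by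
  intro l
  induction l with
  | nil =>
    intro buf out hlen
    simp only [List.foldl_nil, List.append_nil]
    rw [List.drop_eq_nil_of_le (by omega), List.zip_nil_right, List.append_nil]
  | cons item l' ih =>
    intro buf out hlen
    rw [List.foldl_cons]
    by_cases hfull : buf.length = w - 1
    · have hcond : ((buf.length : Int) == (w : Int) - 1) = true := by
        simp [hfull]; omega
      have hne : buf ≠ [] := by
        intro h; rw [h] at hfull; simp at hfull; omega
      obtain ⟨b0, bt, rfl⟩ : ∃ b0 bt, buf = b0 :: bt := by
        cases buf with
        | nil => exact absurd rfl hne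
        | cons a t => exact ⟨a, t, rfl⟩
      rw [show pvStepB (w : Int) (b0 :: bt, out) item
            = (bt ++ [item], out ++ [(b0, item)]) by
          simp only [List.length_cons] at hfull
          simp [pvStepB]
          omega]
      rw [ih (bt ++ [item]) (out ++ [(b0, item)]) (by simp only [List.length_cons] at hfull; simp; omega)]
      have hdrop1 : ((b0 :: bt) ++ item :: l').drop (w - 1) = item :: l' := by
        have h1 : ((b0 :: bt) ++ item :: l') = (b0 :: bt) ++ (item :: l') := rfl
        rw [h1, List.drop_append_of_le_length (by simp only [List.length_cons] at hfull; simp; omega)]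
        have : (b0 :: bt).drop (w - 1) = [] := by
          apply List.drop_eq_nil_of_le; simp only [List.length_cons] at hfull; simp; omega
        simp [this]
      have hdrop2 : ((bt ++ [item]) ++ l').drop (w - 1) = l' := by
        rw [List.drop_append_of_le_length (by simp only [List.length_cons] at hfull; simp; omega)]
        have : (bt ++ [item]).drop (w - 1) = [] := by
          apply List.drop_eq_nil_of_le; simp only [List.length_cons] at hfull; simp; omega
        simp [this]
      rw [hdrop1, hdrop2]
      have hassoc : (bt ++ [item]) ++ l' = bt ++ item :: l' := by simp
      rw [hassoc]
      simp [List.zip]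
    · have hcond : ((buf.length : Int) == (w : Int) - 1) = false := by
        simp; omega
      rw [show pvStepB (w : Int) (buf, out) item = (buf ++ [item], out) by
          simp [pvStepB, hcond]]
      rw [ih (buf ++ [item]) out (by simp; omega)]
      have : (buf ++ [item]) ++ l' = buf ++ item :: l' := by simp
      rw [this]

-- ===== VERDICT (by name: the statement is the Claim_ definition above) =====
theorem positive_pairs_spec : Claim_equal_positive_pairs := by
  intro history ws _ hpre
  have hw2 : (2 : Int) ≤ ws := hpre
  obtain ⟨w, rfl⟩ : ∃ w : Nat, ws = (w : Int) := ⟨ws.toNat, by omega⟩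
  have hw : 2 ≤ w := by exact_mod_cast hw2
  unfold Spec_positive_pairs positive_pairs positive_pairs_alt
  rw [if_neg (show ¬((w : Int) < 2) by omega), if_neg (show ¬((w : Int) < 2) by omega)]
  rw [pvB_fold w hw history [] [] (by simp)]
  simp only [List.nil_append]
  by_cases hn : (history.length : Int) < (w : Int)
  · rw [if_pos hn]
    have : history.drop (w - 1) = [] := by
      apply List.drop_eq_nil_of_le; omega
    rw [this, List.zip_nil_right]
  · rw [if_neg hn]
    exact pv_window_eq_zip history w hw (by omega)
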